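-- pv_equiv track=rewrite | github.com/rkorostin/Python_Basics | Homework/hw3/task3.py | fill_backpack_all
-- ===== SOURCE A (Python) =====
-- def fill_backpack_all(items, max_weight):
--     """
--     Функция позволяет получить все возможные варианты сборки рюкзака из вещей items
--     с ограничением по весу max_weight
--     """
--     backpacks = [[]]  # список для хранения всех возможных вариантов комплектации рюкзака
--     for item, weight in items.items():  # итерация по каждому предмету и его весу из списка items.items()
--         if weight <= max_weight:
--             new_backpacks = []  # в новом списке будут храниться новые варианты сборки рюкзака
--             for backpack in backpacks:  # итерируемся по каждому рюкзаку в списке backpacks.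
--                 new_backpack = backpack + [item]  # создается новый рюкзак, который является
--                 # копией текущего рюкзака backpack, но с добавлением текущего предмета item
--                 new_backpacks.append(new_backpack)
--             backpacks.extend(new_backpacks)
--     return backpacks
-- ===== SOURCE B (Python) =====
-- def fill_backpack_all(items, max_weight):
--     qualifying = [item for item, weight in items.items() if weight <= max_weight]
--     n = len(qualifying)
--     return [[qualifying[i] for i in range(n) if (mask >> i) & 1]
--             for mask in range(1 << n)]
-- ===== Notes on version B (the rewrite author's own statement) =====
-- stated objective: idiomatic
-- what changed: Replaces A's incremental list-doubling (extend with copies on each qualifying item) by direct bitmask enumeration: filter the qualifying items once, then map each mask in range(2**n) to its bit-indexed subset.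
import Mathlib
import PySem

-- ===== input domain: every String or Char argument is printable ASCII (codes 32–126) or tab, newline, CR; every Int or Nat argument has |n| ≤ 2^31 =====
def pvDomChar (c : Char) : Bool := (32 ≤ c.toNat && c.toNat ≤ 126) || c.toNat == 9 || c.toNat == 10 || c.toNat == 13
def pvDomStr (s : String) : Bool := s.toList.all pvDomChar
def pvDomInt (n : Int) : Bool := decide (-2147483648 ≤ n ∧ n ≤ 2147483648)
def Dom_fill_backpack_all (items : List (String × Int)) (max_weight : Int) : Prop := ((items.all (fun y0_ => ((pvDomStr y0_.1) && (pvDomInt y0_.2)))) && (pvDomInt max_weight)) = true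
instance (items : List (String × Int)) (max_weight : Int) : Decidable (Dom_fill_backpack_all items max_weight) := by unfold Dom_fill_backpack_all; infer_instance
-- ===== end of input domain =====

-- B replaces A's incremental list-doubling by direct bitmask enumeration of subsets (idiomatic; same exponential cost).

-- ===== PORT A =====
-- literal port of A: start from [[]]; for each (item, weight), if weight ≤ max_weight,
-- extend the list with a copy of every backpack so far plus the item appended.
def fill_backpack_all (items : List (String × Int)) (max_weight : Int) : List (List String) :=
  items.foldl
    (fun backpacks iw =>
      if iw.2 ≤ max_weight then
        backpacks ++ backpacks.map (fun backpack => backpack ++ [iw.1])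
      else backpacks)
    [[]]

-- ===== PORT B =====
-- literal port of Source B: filter the qualifying item names once, then map each mask in
-- range(2^n) to the subset [qualifying[i] for i in range(n) if (mask >> i) & 1]
-- ((mask >> i) & 1 == 1  is  Nat.testBit mask i; the index i is always < n, so getD is exact).
def fill_backpack_all_alt (items : List (String × Int)) (max_weight : Int) : List (List String) :=
  let qualifying := (items.filter (fun iw => decide (iw.2 ≤ max_weight))).map Prod.fst
  let n := qualifying.length
  (List.range (2 ^ n)).map
    (fun mask => ((List.range n).filter (fun i => Nat.testBit mask i)).map (fun i => qualifying.getD i ""))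

-- ===== PRECONDITION & SPEC =====
-- items is a Python dict, whose keys are necessarily distinct; Pre_ only excludes
-- association lists with duplicate keys, which do not correspond to any dict input.
def Pre_fill_backpack_all (items : List (String × Int)) (max_weight : Int) : Prop :=
  (items.map Prod.fst).Nodup
instance (items : List (String × Int)) (max_weight : Int) : Decidable (Pre_fill_backpack_all items max_weight) := by unfold Pre_fill_backpack_all; infer_instance
def pvWitness_fill_backpack_all : (List (String × Int)) × Int := ([("a", 1), ("b", 3)], 2)

def Spec_fill_backpack_all (items : List (String × Int)) (max_weight : Int) (out : List (List String)) : Prop := out = fill_backpack_all_alt items max_weight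
instance (items : List (String × Int)) (max_weight : Int) (out : List (List String)) : Decidable (Spec_fill_backpack_all items max_weight out) := by unfold Spec_fill_backpack_all; infer_instance

-- ===== CLAIM (what is proved, stated in full; the proofs are below) =====
def Claim_equal_fill_backpack_all : Prop := ∀ (items : List (String × Int)) (max_weight : Int), Dom_fill_backpack_all items max_weight → Pre_fill_backpack_all items max_weight → Spec_fill_backpack_all items max_weight (fill_backpack_all items max_weight)

-- ===== LEMMAS AND PROOFS =====

-- A's doubling step, abstracted over the (already qualifying) item name.
def pvDbl (acc : List (List String)) (a : String) : List (List String) :=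
  acc ++ acc.map (fun backpack => backpack ++ [a])

-- B's subset of q selected by the bits of mask.
def pvSub (q : List String) (mask : Nat) : List String :=
  ((List.range q.length).filter (fun i => Nat.testBit mask i)).map (fun i => q.getD i "")

-- A's fold over the raw items equals the abstract doubling fold over the qualifying names.
theorem pvFoldA (max_weight : Int) (items : List (String × Int)) (acc : List (List String)) :
    items.foldl
      (fun backpacks iw =>
        if iw.2 ≤ max_weight then
          backpacks ++ backpacks.map (fun backpack => backpack ++ [iw.1])
        else backpacks) acc
    = ((items.filter (fun iw => decide (iw.2 ≤ max_weight))).map Prod.fst).foldl pvDbl acc := by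
  induction items generalizing acc with
  | nil => rfl
  | cons h t ih =>
    by_cases hc : h.2 ≤ max_weight <;>
      simp [hc, pvDbl, ih]

theorem pvTestBit_pow_add (n m i : Nat) (h : m < 2 ^ n) (hi : i ≤ n) :
    Nat.testBit (2 ^ n + m) i = if i = n then true else Nat.testBit m i := by
  rcases Nat.lt_or_ge i n with hlt | hge
  · have hne : i ≠ n := Nat.ne_of_lt hlt
    rw [if_neg hne, Nat.testBit_eq_decide_div_mod_eq, Nat.testBit_eq_decide_div_mod_eq]
    have hsplit : (2 : Nat) ^ n = 2 ^ i * 2 ^ (n - i) := by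
      rw [← pow_add]; congr 1; omega
    have hdiv : (2 ^ n + m) / 2 ^ i = 2 ^ (n - i) + m / 2 ^ i := by
      rw [hsplit, Nat.mul_add_div (Nat.two_pow_pos i)]
    rw [hdiv]
    have hev : (2 : Nat) ^ (n - i) = 2 * 2 ^ (n - i - 1) := by
      rw [← pow_succ']; congr 1; omega
    rw [hev, decide_eq_decide]
    omega
  · have heq : i = n := le_antisymm hi hge
    subst heq
    rw [if_pos rfl, Nat.testBit_eq_decide_div_mod_eq]
    have : (2 ^ i + m) / 2 ^ i = 1 + m / 2 ^ i := by
      rw [Nat.add_comm, Nat.add_div_right _ (Nat.two_pow_pos i), Nat.add_comm]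
    rw [this, Nat.div_eq_of_lt h]
    norm_num

theorem pvSub_append_low (q : List String) (a : String) (mask : Nat) (h : mask < 2 ^ q.length) :
    pvSub (q ++ [a]) mask = pvSub q mask := by
  unfold pvSub
  have hbit : Nat.testBit mask q.length = false := Nat.testBit_lt_two_pow h
  rw [List.length_append, List.length_cons, List.length_nil, List.range_succ,
    List.filter_append]
  simp only [List.filter_cons, List.filter_nil, hbit, Bool.false_eq_true, if_false,
    List.append_nil]
  apply List.map_congr_left
  intro i hmem
  have hi : i < q.length := List.mem_range.mp (List.mem_of_mem_filter hmem)
  rw [List.getD_append _ _ _ _ hi]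

theorem pvSub_append_high (q : List String) (a : String) (mask : Nat) (h : mask < 2 ^ q.length) :
    pvSub (q ++ [a]) (2 ^ q.length + mask) = pvSub q mask ++ [a] := by
  unfold pvSub
  rw [List.length_append, List.length_cons, List.length_nil, List.range_succ,
    List.filter_append]
  have hbitn : Nat.testBit (2 ^ q.length + mask) q.length = true := by
    rw [pvTestBit_pow_add _ _ _ h le_rfl, if_pos rfl]
  have hfc : List.filter (fun i => Nat.testBit (2 ^ q.length + mask) i) (List.range q.length)
      = List.filter (fun i => Nat.testBit mask i) (List.range q.length) := by
    apply List.filter_congr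
    intro i hmem
    have hi : i < q.length := List.mem_range.mp hmem
    rw [pvTestBit_pow_add _ _ _ h (Nat.le_of_lt hi), if_neg (Nat.ne_of_lt hi)]
  rw [hfc]
  simp only [List.filter_cons, List.filter_nil, hbitn, if_pos, List.map_append]
  congr 1
  · apply List.map_congr_left
    intro i hmem
    have hi : i < q.length := List.mem_range.mp (List.mem_of_mem_filter hmem)
    rw [List.getD_append _ _ _ _ hi]
  · simp

theorem pvMain (q : List String) :
    List.foldl pvDbl [[]] q = (List.range (2 ^ q.length)).map (pvSub q) := by
  induction q using List.reverseRecOn with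
  | nil => simp [pvSub]
  | append_singleton q a ih =>
    rw [List.foldl_append, List.foldl_cons, List.foldl_nil, ih]
    have hlen : (q ++ [a]).length = q.length + 1 := by simp
    rw [hlen, pow_succ, Nat.mul_two, List.range_add]
    rw [List.map_append, List.map_map]
    show pvDbl _ _ = _
    unfold pvDbl
    congr 1
    · apply List.map_congr_left
      intro mask hmem
      exact (pvSub_append_low q a mask (List.mem_range.mp hmem)).symm
    · rw [List.map_map]
      apply List.map_congr_left
      intro mask hmem
      have h := List.mem_range.mp hmem
      show pvSub q mask ++ [a] = pvSub (q ++ [a]) (2 ^ q.length + mask)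
      exact (pvSub_append_high q a mask h).symm

-- ===== VERDICT (by name: the statement is the Claim_ definition above) =====
theorem fill_backpack_all_spec : Claim_equal_fill_backpack_all := by
  intro items max_weight _ _
  unfold Spec_fill_backpack_all fill_backpack_all fill_backpack_all_alt
  rw [pvFoldA, pvMain]
  rfl
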